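-- pv_equiv track=rewrite | github.com/yang-su2000/Leetcode-algorithm-practice | 3001-minimum-moves-to-capture-the-queen/3001-minimum-moves-to-capture-the-queen.py | minMovesToCaptureTheQueen
-- ===== SOURCE A (Python) =====
-- def minMovesToCaptureTheQueen(a: int, b: int, c: int, d: int, e: int, f: int) -> int:
--     if a == e:
--         x, y = min(b, f), max(b, f)
--         if not (x < d < y and c == a):
--             return 1
--     if b == f:
--         x, y = min(a, e), max(a, e)
--         if not (x < c < y and d == b):
--             return 1
--     def sign(x):
--         return 1 if x > 0 else -1
--     if abs(e - c) == abs(f - d):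
--         dx = sign(e - c)
--         dy = sign(f - d)
--         flag = True
--         for x, y in zip(range(c, e, dx), range(d, f, dy)):
--             if (x, y) == (a, b):
--                 flag = False
--                 break
--         if flag:
--             return 1
--     return 2
-- ===== SOURCE B (Python) =====
-- def minMovesToCaptureTheQueen(a: int, b: int, c: int, d: int, e: int, f: int) -> int:
--     def strictly_between(lo, x, hi):
--         return min(lo, hi) < x < max(lo, hi)
--     rook_hits = (a == e and not (c == a and strictly_between(b, d, f))) or \
--                 (b == f and not (d == b and strictly_between(a, c, e)))
--     k = (a - c) * (1 if e > c else -1)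
--     bishop_hits = abs(e - c) == abs(f - d) and not (
--         k == (b - d) * (1 if f > d else -1) and 0 <= k < abs(e - c))
--     return 1 if (rook_hits or bishop_hits) else 2
-- ===== Notes on version B (the rewrite author's own statement) =====
-- stated objective: alternative
-- what changed: A scans the bishop's diagonal square by square (zip of two ranges) to see whether the rook blocks it; B replaces that scan with an O(1) closed-form arithmetic blocking test and folds the three attack checks into a single boolean expression.
import Mathlib
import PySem

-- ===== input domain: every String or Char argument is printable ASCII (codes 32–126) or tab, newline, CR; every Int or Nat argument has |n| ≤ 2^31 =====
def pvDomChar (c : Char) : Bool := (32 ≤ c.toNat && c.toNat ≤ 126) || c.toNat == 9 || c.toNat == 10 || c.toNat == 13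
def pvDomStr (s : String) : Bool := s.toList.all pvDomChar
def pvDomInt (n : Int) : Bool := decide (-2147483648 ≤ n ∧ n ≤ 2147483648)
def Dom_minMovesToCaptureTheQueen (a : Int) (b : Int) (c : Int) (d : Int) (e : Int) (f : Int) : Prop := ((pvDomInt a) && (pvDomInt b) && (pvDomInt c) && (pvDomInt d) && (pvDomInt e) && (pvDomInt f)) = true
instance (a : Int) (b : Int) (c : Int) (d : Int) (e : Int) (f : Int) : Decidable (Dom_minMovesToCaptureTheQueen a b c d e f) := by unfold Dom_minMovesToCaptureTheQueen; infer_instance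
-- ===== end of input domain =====

-- B replaces A's square-by-square scan along the bishop's diagonal with an O(1) closed-form
-- blocking test (and folds the three attack checks into one boolean expression).

-- ===== PORT A =====
-- Python's local `sign`: 1 if x > 0 else -1
def pvSign (x : Int) : Int := if x > 0 then 1 else -1

-- the `for x, y in zip(...): if (x, y) == (a, b): flag = False; break` loop
def pvFlagLoop (a b : Int) : List (Int × Int) → Bool
  | [] => true
  | (x, y) :: rest => if x = a ∧ y = b then false else pvFlagLoop a b rest

def minMovesToCaptureTheQueen (a : Int) (b : Int) (c : Int) (d : Int) (e : Int) (f : Int) : Int :=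
  if a = e ∧ ¬ (min b f < d ∧ d < max b f ∧ c = a) then 1
  else if b = f ∧ ¬ (min a e < c ∧ c < max a e ∧ d = b) then 1
  else if |e - c| = |f - d| then
    let dx := pvSign (e - c)
    let dy := pvSign (f - d)
    let flag := pvFlagLoop a b (List.zip (PySem.List.pyRange c e dx) (PySem.List.pyRange d f dy))
    if flag then 1 else 2
  else 2

-- ===== PORT B =====
def pvStrictlyBetween (lo x hi : Int) : Bool := decide (min lo hi < x ∧ x < max lo hi)

def minMovesToCaptureTheQueen_alt (a : Int) (b : Int) (c : Int) (d : Int) (e : Int) (f : Int) : Int :=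
  let rookHits := (a = e ∧ ¬ (c = a ∧ pvStrictlyBetween b d f = true)) ∨
                  (b = f ∧ ¬ (d = b ∧ pvStrictlyBetween a c e = true))
  let k := (a - c) * (if e > c then 1 else -1)
  let bishopHits := |e - c| = |f - d| ∧
    ¬ (k = (b - d) * (if f > d then 1 else -1) ∧ 0 ≤ k ∧ k < |e - c|)
  if rookHits ∨ bishopHits then 1 else 2

-- ===== PRECONDITION & SPEC =====
def Spec_minMovesToCaptureTheQueen (a : Int) (b : Int) (c : Int) (d : Int) (e : Int) (f : Int) (out : Int) : Prop := out = minMovesToCaptureTheQueen_alt a b c d e f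
instance (a : Int) (b : Int) (c : Int) (d : Int) (e : Int) (f : Int) (out : Int) : Decidable (Spec_minMovesToCaptureTheQueen a b c d e f out) := by unfold Spec_minMovesToCaptureTheQueen; infer_instance

-- ===== CLAIM (what is proved, stated in full; the proofs are below) =====
def Claim_equal_minMovesToCaptureTheQueen : Prop := ∀ (a : Int) (b : Int) (c : Int) (d : Int) (e : Int) (f : Int), Dom_minMovesToCaptureTheQueen a b c d e f → Spec_minMovesToCaptureTheQueen a b c d e f (minMovesToCaptureTheQueen a b c d e f)

-- ===== LEMMAS AND PROOFS =====

-- A's loop sets flag to false exactly when (a, b) occurs in the zipped ray.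
theorem pvFlagLoop_eq_not_mem (a b : Int) (l : List (Int × Int)) :
    pvFlagLoop a b l = !decide ((a, b) ∈ l) := by
  induction l with
  | nil => simp [pvFlagLoop]
  | cons p rest ih =>
    obtain ⟨x, y⟩ := p
    by_cases h : x = a ∧ y = b
    · simp [pvFlagLoop, h.1, h.2]
    · simp only [pvFlagLoop, if_neg h, ih, List.mem_cons]
      have hne : ¬ ((a, b) = (x, y)) := by
        intro hp
        obtain ⟨hx, hy⟩ := Prod.mk.injEq .. ▸ hp
        exact h ⟨hx.symm, hy.symm⟩
      simp [hne]

theorem pyRange_sign (c e : Int) :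
    PySem.List.pyRange c e (pvSign (e - c)) =
      (List.range (e - c).natAbs).map (fun k : Nat => c + pvSign (e - c) * (k : Int)) := by
  unfold pvSign
  by_cases h : e - c > 0
  · rw [if_pos h, PySem.List.pyRange_one, show (e - c).toNat = (e - c).natAbs by omega]
    exact List.map_congr_left (fun k _ => by ring)
  · rw [if_neg h, PySem.List.pyRange_neg_one, show (c - e).toNat = (e - c).natAbs by omega]
    exact List.map_congr_left (fun k _ => by ring)

theorem mem_zip_diag (a b c d e f : Int) (h : |e - c| = |f - d|) :
    ((a, b) ∈ List.zip (PySem.List.pyRange c e (pvSign (e - c)))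
                        (PySem.List.pyRange d f (pvSign (f - d)))) ↔
      ((a - c) * (if e > c then 1 else -1) = (b - d) * (if f > d then 1 else -1) ∧
       0 ≤ (a - c) * (if e > c then 1 else -1) ∧
       (a - c) * (if e > c then 1 else -1) < |e - c|) := by
  have h' : ((e - c).natAbs : Int) = ((f - d).natAbs : Int) := by
    rw [← Int.abs_eq_natAbs, ← Int.abs_eq_natAbs]; exact h
  have hn : (f - d).natAbs = (e - c).natAbs := by omega
  rw [pyRange_sign, pyRange_sign, hn, List.zip_map']
  have hs : pvSign (e - c) = (if e > c then 1 else -1) := by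
    unfold pvSign; by_cases h1 : e > c
    · rw [if_pos h1, if_pos (by omega : e - c > 0)]
    · rw [if_neg h1, if_neg (by omega : ¬ e - c > 0)]
  have ht : pvSign (f - d) = (if f > d then 1 else -1) := by
    unfold pvSign; by_cases h1 : f > d
    · rw [if_pos h1, if_pos (by omega : f - d > 0)]
    · rw [if_neg h1, if_neg (by omega : ¬ f - d > 0)]
  rw [hs, ht]
  have habs : |e - c| = ((e - c).natAbs : Int) := Int.abs_eq_natAbs _
  rw [habs]
  simp only [List.mem_map, List.mem_range, Prod.mk.injEq]
  constructor
  · rintro ⟨k, hk, hx, hy⟩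
    have hk' : (k : Int) < ((e - c).natAbs : Int) := by exact_mod_cast hk
    by_cases h1 : e > c <;> by_cases h2 : f > d <;>
      simp only [h1, h2, if_true, if_false] at hx hy ⊢ <;> omega
  · rintro ⟨heq, h0, hlt⟩
    refine ⟨((a - c) * (if e > c then 1 else -1)).toNat, ?_, ?_, ?_⟩ <;>
      by_cases h1 : e > c <;> by_cases h2 : f > d <;>
        simp only [h1, h2, if_true, if_false] at heq h0 hlt ⊢ <;> omega

-- ===== VERDICT (by name: the statement is the Claim_ definition above) =====
theorem minMovesToCaptureTheQueen_spec : Claim_equal_minMovesToCaptureTheQueen := by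
  intro a b c d e f _
  show minMovesToCaptureTheQueen a b c d e f = minMovesToCaptureTheQueen_alt a b c d e f
  unfold minMovesToCaptureTheQueen minMovesToCaptureTheQueen_alt pvStrictlyBetween
  simp only [decide_eq_true_eq]
  by_cases h1 : a = e ∧ ¬ (min b f < d ∧ d < max b f ∧ c = a)
  · rw [if_pos h1, if_pos (Or.inl (Or.inl (by tauto)))]
  · rw [if_neg h1]
    by_cases h2 : b = f ∧ ¬ (min a e < c ∧ c < max a e ∧ d = b)
    · rw [if_pos h2, if_pos (Or.inl (Or.inr (by tauto)))]
    · rw [if_neg h2]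
      have hrook : ¬ ((a = e ∧ ¬ (c = a ∧ min b f < d ∧ d < max b f)) ∨
                      (b = f ∧ ¬ (d = b ∧ min a e < c ∧ c < max a e))) := by tauto
      by_cases hd : |e - c| = |f - d|
      · rw [if_pos hd, pvFlagLoop_eq_not_mem]
        by_cases hmem : (a, b) ∈ List.zip (PySem.List.pyRange c e (pvSign (e - c)))
            (PySem.List.pyRange d f (pvSign (f - d)))
        · have hC := (mem_zip_diag a b c d e f hd).mp hmem
          have hflag : (!decide ((a, b) ∈ List.zip (PySem.List.pyRange c e (pvSign (e - c)))
              (PySem.List.pyRange d f (pvSign (f - d))))) = false := by simp [hmem]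
          have hB : ¬ (((a = e ∧ ¬ (c = a ∧ (min b f < d ∧ d < max b f))) ∨ (b = f ∧ ¬ (d = b ∧ (min a e < c ∧ c < max a e)))) ∨ (|e - c| = |f - d| ∧ ¬ ((a - c) * (if e > c then 1 else -1) = (b - d) * (if f > d then 1 else -1) ∧ 0 ≤ (a - c) * (if e > c then 1 else -1) ∧ (a - c) * (if e > c then 1 else -1) < |e - c|))) := by
            rintro (hr | ⟨_, hb⟩)
            · exact hrook hr
            · exact hb ⟨hC.1, hC.2.1, hC.2.2⟩
          rw [hflag, if_neg hB]
          simp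
        · have hflag : (!decide ((a, b) ∈ List.zip (PySem.List.pyRange c e (pvSign (e - c)))
              (PySem.List.pyRange d f (pvSign (f - d))))) = true := by simp [hmem]
          have hB : ((a = e ∧ ¬ (c = a ∧ (min b f < d ∧ d < max b f))) ∨ (b = f ∧ ¬ (d = b ∧ (min a e < c ∧ c < max a e)))) ∨ (|e - c| = |f - d| ∧ ¬ ((a - c) * (if e > c then 1 else -1) = (b - d) * (if f > d then 1 else -1) ∧ 0 ≤ (a - c) * (if e > c then 1 else -1) ∧ (a - c) * (if e > c then 1 else -1) < |e - c|)) :=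
            Or.inr ⟨hd, fun hC => hmem ((mem_zip_diag a b c d e f hd).mpr hC)⟩
          rw [hflag, if_pos hB]
          simp
      · have hB : ¬ (((a = e ∧ ¬ (c = a ∧ (min b f < d ∧ d < max b f))) ∨ (b = f ∧ ¬ (d = b ∧ (min a e < c ∧ c < max a e)))) ∨ (|e - c| = |f - d| ∧ ¬ ((a - c) * (if e > c then 1 else -1) = (b - d) * (if f > d then 1 else -1) ∧ 0 ≤ (a - c) * (if e > c then 1 else -1) ∧ (a - c) * (if e > c then 1 else -1) < |e - c|))) := by rintro (hr | ⟨hb, _⟩); exacts [hrook hr, hd hb]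
        rw [if_neg hd, if_neg hB]
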